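-- pv_equiv track=rewrite | github.com/udyam-digital/Artha | providers/nse_bse.py | _detect_flags
-- ===== SOURCE A (Python) =====
-- _GUIDANCE_KEYWORDS = ("guidance", "outlook", "revised", "upgrade", "downgrade", "profit warning", "revenue guidance")
--
-- _MANAGEMENT_KEYWORDS = (
--     "resign",
--     "appoint",
--     "director",
--     "chief executive",
--     "ceo",
--     "cfo",
--     "managing director",
--     " md ",
--     "change in management",
--     "key managerial",
-- )
--
-- _PLEDGE_KEYWORDS = ("pledg", "encumber", "creation of charge", "revocation of pledge")
--
-- _AUDIT_KEYWORDS = ("auditor", "audit qualif", "emphasis of matter", "resignation of statutory", "change in auditor")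
--
-- def _detect_flags(filings: list[dict]) -> dict[str, bool]:
--     """Scan all filing headlines for story-breaker flags."""
--     has_guidance = has_management = has_pledge = has_audit = False
--     for f in filings:
--         text = (f.get("headline") or "").lower()
--         if not has_guidance and any(kw in text for kw in _GUIDANCE_KEYWORDS):
--             has_guidance = True
--         if not has_management and any(kw in text for kw in _MANAGEMENT_KEYWORDS):
--             has_management = True
--         if not has_pledge and any(kw in text for kw in _PLEDGE_KEYWORDS):
--             has_pledge = True
--         if not has_audit and any(kw in text for kw in _AUDIT_KEYWORDS):
--             has_audit = True
--     return {
--         "has_guidance_update": has_guidance,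
--         "has_management_change": has_management,
--         "has_pledging_update": has_pledge,
--         "has_audit_issue": has_audit,
--     }
-- ===== SOURCE B (Python) =====
-- _GUIDANCE_KEYWORDS = ("guidance", "outlook", "revised", "upgrade", "downgrade", "profit warning", "revenue guidance")
--
-- _MANAGEMENT_KEYWORDS = (
--     "resign",
--     "appoint",
--     "director",
--     "chief executive",
--     "ceo",
--     "cfo",
--     "managing director",
--     " md ",
--     "change in management",
--     "key managerial",
-- )
--
-- _PLEDGE_KEYWORDS = ("pledg", "encumber", "creation of charge", "revocation of pledge")
--
-- _AUDIT_KEYWORDS = ("auditor", "audit qualif", "emphasis of matter", "resignation of statutory", "change in auditor")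
--
-- def _detect_flags(filings):
--     """Scan filing headlines category-major over one joined blob ('\n' occurs in no keyword)."""
--     text = "\n".join((f.get("headline") or "").lower() for f in filings)
--     return {
--         "has_guidance_update": any(kw in text for kw in _GUIDANCE_KEYWORDS),
--         "has_management_change": any(kw in text for kw in _MANAGEMENT_KEYWORDS),
--         "has_pledging_update": any(kw in text for kw in _PLEDGE_KEYWORDS),
--         "has_audit_issue": any(kw in text for kw in _AUDIT_KEYWORDS),
--     }
-- ===== Notes on version B (the rewrite author's own statement) =====
-- stated objective: simpler
-- what changed: Replaces A's filing-major loop carrying four early-exit flag accumulators by a category-major scan: all lowered headlines are joined into one newline-separated blob and each flag is computed once with any() over its keyword list (newline occurs in no keyword, so no cross-boundary match).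
import Mathlib
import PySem

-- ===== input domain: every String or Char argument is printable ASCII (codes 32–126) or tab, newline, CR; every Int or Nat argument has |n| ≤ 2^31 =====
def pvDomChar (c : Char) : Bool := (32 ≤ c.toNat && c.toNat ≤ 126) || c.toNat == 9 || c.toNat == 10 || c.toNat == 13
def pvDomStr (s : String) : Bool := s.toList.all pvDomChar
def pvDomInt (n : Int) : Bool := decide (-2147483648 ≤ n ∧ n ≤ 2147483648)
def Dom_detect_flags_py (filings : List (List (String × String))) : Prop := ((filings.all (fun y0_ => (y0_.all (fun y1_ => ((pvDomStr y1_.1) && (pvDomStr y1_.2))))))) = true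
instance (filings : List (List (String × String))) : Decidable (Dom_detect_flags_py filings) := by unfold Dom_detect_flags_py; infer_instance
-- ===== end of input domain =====

-- B replaces A's filing-major loop with four early-exit flag accumulators by a category-major
-- scan over one newline-joined blob of lowered headlines (objective: simpler; not faster).

-- module keyword constants (shared data of both versions)
def kwGuidance : List String :=
  ["guidance", "outlook", "revised", "upgrade", "downgrade", "profit warning", "revenue guidance"]
def kwManagement : List String :=
  ["resign", "appoint", "director", "chief executive", "ceo", "cfo", "managing director",
   " md ", "change in management", "key managerial"]
def kwPledge : List String :=
  ["pledg", "encumber", "creation of charge", "revocation of pledge"]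
def kwAudit : List String :=
  ["auditor", "audit qualif", "emphasis of matter", "resignation of statutory", "change in auditor"]

-- (f.get("headline") or "").lower() — exact: `or ""` maps None and "" (the only falsy str) to ""
def pvText (f : List (String × String)) : String :=
  PySem.Str.lower (match PySem.Dict.get? ⟨f⟩ "headline" with
                   | some s => if s == "" then "" else s
                   | none => "")

-- ===== PORT A =====
-- one iteration of A's loop over the four flag accumulators
def pvStepA (st : Bool × Bool × Bool × Bool) (f : List (String × String)) :
    Bool × Bool × Bool × Bool :=
  let text := pvText f
  (if !st.1 && kwGuidance.any (fun kw => PySem.Str.isIn kw text) then true else st.1,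
   if !st.2.1 && kwManagement.any (fun kw => PySem.Str.isIn kw text) then true else st.2.1,
   if !st.2.2.1 && kwPledge.any (fun kw => PySem.Str.isIn kw text) then true else st.2.2.1,
   if !st.2.2.2 && kwAudit.any (fun kw => PySem.Str.isIn kw text) then true else st.2.2.2)

def detect_flags_py (filings : List (List (String × String))) : List (String × Bool) :=
  let st := filings.foldl pvStepA (false, false, false, false)
  [("has_guidance_update", st.1), ("has_management_change", st.2.1),
   ("has_pledging_update", st.2.2.1), ("has_audit_issue", st.2.2.2)]

-- ===== PORT B =====
def detect_flags_py_alt (filings : List (List (String × String))) : List (String × Bool) :=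
  let text := PySem.Str.join "\n" (filings.map pvText)
  [("has_guidance_update", kwGuidance.any (fun kw => PySem.Str.isIn kw text)),
   ("has_management_change", kwManagement.any (fun kw => PySem.Str.isIn kw text)),
   ("has_pledging_update", kwPledge.any (fun kw => PySem.Str.isIn kw text)),
   ("has_audit_issue", kwAudit.any (fun kw => PySem.Str.isIn kw text))]

-- ===== PRECONDITION & SPEC =====
def Spec_detect_flags_py (filings : List (List (String × String))) (out : List (String × Bool)) : Prop := out = detect_flags_py_alt filings
instance (filings : List (List (String × String))) (out : List (String × Bool)) : Decidable (Spec_detect_flags_py filings out) := by unfold Spec_detect_flags_py; infer_instance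

-- ===== CLAIM (what is proved, stated in full; the proofs are below) =====
def Claim_equal_detect_flags_py : Prop := ∀ (filings : List (List (String × String))), Dom_detect_flags_py filings → Spec_detect_flags_py filings (detect_flags_py filings)

-- ===== LEMMAS AND PROOFS =====

-- a keyword containing no '\n' is an infix of `p ++ '\n' :: s` iff it is an infix of p or of s
theorem pv_infix_append_cons_iff (kw p s : List Char) (hnl : '\n' ∉ kw) :
    kw <:+: p ++ '\n' :: s ↔ kw <:+: p ∨ kw <:+: s := by
  constructor
  · rintro ⟨pre, suf, h⟩
    by_cases hc : pre.length + kw.length ≤ p.length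
    · left
      have hpfx : pre ++ kw <+: p := by
        refine List.prefix_of_prefix_length_le (l₃ := p ++ '\n' :: s) ⟨suf, by simpa using h⟩
          (List.prefix_append _ _) (by simpa using hc)
      obtain ⟨t, ht⟩ := hpfx
      exact ⟨pre, t, by simpa using ht⟩
    · by_cases hc2 : p.length + 1 ≤ pre.length
      · right
        have h' := congrArg (List.drop (p.length + 1)) h
        rw [List.append_assoc, List.drop_append_of_le_length hc2] at h'
        have hs : (p ++ '\n' :: s).drop (p.length + 1) = s := by
          have : p ++ '\n' :: s = (p ++ ['\n']) ++ s := by simp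
          rw [this]
          have hlen : (p ++ ['\n']).length = p.length + 1 := by simp
          rw [← hlen, List.drop_left]
        rw [hs] at h'
        exact ⟨pre.drop (p.length + 1), suf, by simpa using h'⟩
      · exfalso
        have h1 : pre.length ≤ p.length := by omega
        have h2 : p.length - pre.length < kw.length := by omega
        have hg := congrArg (fun l => l[p.length]?) h
        simp only at hg
        rw [List.append_assoc] at hg
        rw [List.getElem?_append_right h1, List.getElem?_append_right (le_refl p.length)] at hg
        simp only [Nat.sub_self, List.getElem?_cons_zero] at hg
        rw [List.getElem?_append_left h2] at hg
        have : '\n' ∈ kw := by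
          have := List.getElem?_eq_some_iff.mp hg
          obtain ⟨hlt, he⟩ := this
          exact he ▸ List.getElem_mem hlt
        exact hnl this
  · rintro (⟨pre, suf, h⟩ | h)
    · exact ⟨pre, suf ++ '\n' :: s, by rw [← h]; simp⟩
    · exact h.trans (((List.suffix_cons '\n' s).trans (List.suffix_append p ('\n' :: s))).isInfix)

theorem pv_isIn_join (kw : List Char) (hne : kw ≠ []) (hnl : '\n' ∉ kw)
    (parts : List (List Char)) :
    PySem.Chars.isIn kw (PySem.Chars.join ['\n'] parts) = parts.any (fun p => PySem.Chars.isIn kw p) := by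
  induction parts with
  | nil =>
      rw [PySem.Chars.join_nil]
      simp [PySem.Chars.isIn_eq_false_iff, hne]
  | cons p rest ih =>
      cases rest with
      | nil => simp [PySem.Chars.join_singleton]
      | cons q r =>
          rw [PySem.Chars.join_cons_cons, List.any_cons, ← ih]
          have hap : p ++ ['\n'] ++ PySem.Chars.join ['\n'] (q :: r)
              = p ++ '\n' :: PySem.Chars.join ['\n'] (q :: r) := by simp
          rw [hap]
          have hiff :
              PySem.Chars.isIn kw (p ++ '\n' :: PySem.Chars.join ['\n'] (q :: r)) = true ↔
              (PySem.Chars.isIn kw p || PySem.Chars.isIn kw (PySem.Chars.join ['\n'] (q :: r))) = true := by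
            simp [PySem.Chars.isIn_iff_infix,
                  pv_infix_append_cons_iff kw p (PySem.Chars.join ['\n'] (q :: r)) hnl]
          exact Bool.coe_iff_coe.mp hiff

theorem pv_any_congr_mem {α : Type} (l : List α) (p q : α → Bool)
    (h : ∀ x ∈ l, p x = q x) : l.any p = l.any q := by
  refine Bool.coe_iff_coe.mp ?_
  simp only [List.any_eq_true]
  constructor
  · rintro ⟨x, hx, hp⟩; exact ⟨x, hx, (h x hx) ▸ hp⟩
  · rintro ⟨x, hx, hq⟩; exact ⟨x, hx, (h x hx).symm ▸ hq⟩

theorem pv_any_any_comm {α β : Type} (l : List α) (m : List β) (p : α → β → Bool) :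
    l.any (fun a => m.any fun b => p a b) = m.any (fun b => l.any fun a => p a b) := by
  refine Bool.coe_iff_coe.mp ?_
  simp only [List.any_eq_true]
  constructor
  · rintro ⟨a, ha, b, hb, h⟩; exact ⟨b, hb, a, ha, h⟩
  · rintro ⟨b, hb, a, ha, h⟩; exact ⟨a, ha, b, hb, h⟩

-- per-category: flag over the joined blob = filing-wise any
theorem pv_cat_eq (kws : List String)
    (hk : ∀ kw ∈ kws, kw.toList ≠ [] ∧ '\n' ∉ kw.toList)
    (filings : List (List (String × String))) :
    filings.any (fun f => kws.any fun kw => PySem.Str.isIn kw (pvText f)) =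
    kws.any (fun kw => PySem.Str.isIn kw (PySem.Str.join "\n" (filings.map pvText))) := by
  have hone : ∀ kw ∈ kws,
      PySem.Str.isIn kw (PySem.Str.join "\n" (filings.map pvText)) =
      filings.any (fun f => PySem.Str.isIn kw (pvText f)) := by
    intro kw hkw
    obtain ⟨hne, hnl⟩ := hk kw hkw
    have h1 : PySem.Str.isIn kw (PySem.Str.join "\n" (filings.map pvText)) =
        PySem.Chars.isIn kw.toList ((PySem.Str.join "\n" (filings.map pvText)).toList) := by
      simp [PySem.Str.isIn]
    rw [h1, PySem.Str.toList_join]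
    have hsep : ("\n" : String).toList = ['\n'] := rfl
    rw [hsep, pv_isIn_join kw.toList hne hnl, List.any_map, List.any_map]
    simp [PySem.Str.isIn, Function.comp_def]
  rw [pv_any_congr_mem kws _ _ hone, pv_any_any_comm]

theorem pv_if_or (b c : Bool) : (if !b && c then true else b) = (b || c) := by
  cases b <;> cases c <;> rfl

theorem pv_foldl_stepA (l : List (List (String × String))) (st : Bool × Bool × Bool × Bool) :
    l.foldl pvStepA st =
      (st.1 || l.any (fun f => kwGuidance.any fun kw => PySem.Str.isIn kw (pvText f)),
       st.2.1 || l.any (fun f => kwManagement.any fun kw => PySem.Str.isIn kw (pvText f)),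
       st.2.2.1 || l.any (fun f => kwPledge.any fun kw => PySem.Str.isIn kw (pvText f)),
       st.2.2.2 || l.any (fun f => kwAudit.any fun kw => PySem.Str.isIn kw (pvText f))) := by
  induction l generalizing st with
  | nil => simp
  | cons f t ih =>
      rw [List.foldl_cons, ih]
      simp only [pvStepA, pv_if_or, List.any_cons, Bool.or_assoc]

-- ===== VERDICT (by name: the statement is the Claim_ definition above) =====
theorem detect_flags_py_spec : Claim_equal_detect_flags_py := by
  intro filings _hdom
  show detect_flags_py filings = detect_flags_py_alt filings
  simp only [detect_flags_py, detect_flags_py_alt, pv_foldl_stepA, Bool.false_or]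
  have hG : ∀ kw ∈ kwGuidance, kw.toList ≠ [] ∧ '\n' ∉ kw.toList := by decide
  have hM : ∀ kw ∈ kwManagement, kw.toList ≠ [] ∧ '\n' ∉ kw.toList := by decide
  have hP : ∀ kw ∈ kwPledge, kw.toList ≠ [] ∧ '\n' ∉ kw.toList := by decide
  have hA : ∀ kw ∈ kwAudit, kw.toList ≠ [] ∧ '\n' ∉ kw.toList := by decide
  rw [pv_cat_eq kwGuidance hG, pv_cat_eq kwManagement hM, pv_cat_eq kwPledge hP,
      pv_cat_eq kwAudit hA]
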